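-- pv_equiv track=rewrite | github.com/nikolausn/HURDAT2-for-profiling | solution_a.py | c_storm_hurri
-- ===== SOURCE A (Python) =====
-- def c_storm_hurri(idlist):
--     """
--     Generate an dictionary, whose keys are years and values
--     are number of storms/hurricanes happened during that year
--     :param idlist: Storm ID list
--     :return: count: A dictionary whose keys are years and whose values are total number of storms (or hurricanes) happend during that year
--     """
--     count={}
--     for item in idlist:
--         if item[-4:] in count.keys():
--             count[item[-4:]]+=1
--         else:
--             count[item[-4:]]=1
--     return count
-- ===== SOURCE B (Python) =====
-- def c_storm_hurri(idlist):
--     """Count storms per year: dedup the year suffixes (first-occurrence order),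
--     then emit each distinct year with its total count in the suffix list."""
--     suffixes = [item[-4:] for item in idlist]
--     return {year: suffixes.count(year) for year in dict.fromkeys(suffixes)}
-- ===== Notes on version B (the rewrite author's own statement) =====
-- stated objective: alternative
-- what changed: A tallies incrementally with a membership-guarded counter dict in one pass; B first builds the suffix list, dedups it in first-occurrence order, and emits each distinct year with list.count over the whole suffix list (no incremental accumulator).
import Mathlib
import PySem

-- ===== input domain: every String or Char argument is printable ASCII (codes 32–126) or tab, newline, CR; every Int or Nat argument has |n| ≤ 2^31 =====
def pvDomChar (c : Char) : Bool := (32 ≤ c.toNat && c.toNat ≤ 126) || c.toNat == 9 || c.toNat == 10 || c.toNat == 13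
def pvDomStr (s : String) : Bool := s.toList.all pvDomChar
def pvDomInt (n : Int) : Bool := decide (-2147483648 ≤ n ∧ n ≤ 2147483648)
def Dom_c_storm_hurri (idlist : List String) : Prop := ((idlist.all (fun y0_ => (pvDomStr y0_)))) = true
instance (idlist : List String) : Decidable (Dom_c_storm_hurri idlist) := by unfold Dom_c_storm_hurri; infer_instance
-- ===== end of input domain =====

-- B replaces A's one-pass membership-guarded tally with dedup-the-suffixes-then-count-each (alternative decomposition, same results).


-- ===== PORT A =====
-- for item in idlist: if item[-4:] in count.keys(): count[item[-4:]] += 1 else: count[item[-4:]] = 1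
def c_storm_hurri (idlist : List String) : List (String × Int) :=
  (idlist.foldl
    (fun count item =>
      if count.contains (PySem.Str.slice item (some (-4)) none) then
        -- count[item[-4:]] += 1 (the key is present, so the read is the stored value)
        count.insert (PySem.Str.slice item (some (-4)) none)
          (count.getD (PySem.Str.slice item (some (-4)) none) 0 + 1)
      else
        count.insert (PySem.Str.slice item (some (-4)) none) 1)
    PySem.Dict.empty).items

-- ===== PORT B =====
-- suffixes = [item[-4:] for item in idlist]; {year: suffixes.count(year) for year in dict.fromkeys(suffixes)}
-- dict.fromkeys(suffixes) iterated = PySem.List.dedup; its keys are distinct, so the comprehension's items are this map.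
def c_storm_hurri_alt (idlist : List String) : List (String × Int) :=
  let suffixes := idlist.map (fun item => PySem.Str.slice item (some (-4)) none)
  (PySem.List.dedup suffixes).map (fun year => (year, (suffixes.count year : Int)))

-- ===== PRECONDITION & SPEC =====
def Spec_c_storm_hurri (idlist : List String) (out : List (String × Int)) : Prop := out = c_storm_hurri_alt idlist
instance (idlist : List String) (out : List (String × Int)) : Decidable (Spec_c_storm_hurri idlist out) := by unfold Spec_c_storm_hurri; infer_instance

-- ===== CLAIM (what is proved, stated in full; the proofs are below) =====
def Claim_equal_c_storm_hurri : Prop := ∀ (idlist : List String), Dom_c_storm_hurri idlist → Spec_c_storm_hurri idlist (c_storm_hurri idlist)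

-- ===== LEMMAS AND PROOFS =====
-- A's guarded update is the unconditional 'insert k (getD k 0 + 1)' (when k is absent, getD gives 0).
lemma stepA_eq (count : PySem.Dict String Int) (k : String) :
    (if count.contains k then count.insert k (count.getD k 0 + 1) else count.insert k 1)
      = count.insert k (count.getD k 0 + 1) := by
  by_cases h : count.contains k = true
  · simp [h]
  · simp only [Bool.not_eq_true] at h
    simp [h, PySem.Dict.getD_eq_get?_getD,
          (PySem.Dict.get?_eq_none_iff_contains _ _).mpr h]

-- A's loop over idlist is the plain counting loop over the mapped suffix list.
lemma foldA_eq (l : List String) (d : PySem.Dict String Int) :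
    l.foldl
      (fun count item =>
        if count.contains (PySem.Str.slice item (some (-4)) none) then
          count.insert (PySem.Str.slice item (some (-4)) none)
            (count.getD (PySem.Str.slice item (some (-4)) none) 0 + 1)
        else
          count.insert (PySem.Str.slice item (some (-4)) none) 1)
      d
    = (l.map (fun item => PySem.Str.slice item (some (-4)) none)).foldl
        (fun count k => count.insert k (count.getD k 0 + 1)) d := by
  induction l generalizing d with
  | nil => rfl
  | cons x xs ih =>
      simp only [List.foldl_cons, List.map_cons]
      rw [stepA_eq]
      exact ih _

-- ===== VERDICT (by name: the statement is the Claim_ definition above) =====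
theorem c_storm_hurri_spec : Claim_equal_c_storm_hurri := by
  intro idlist _
  unfold Spec_c_storm_hurri c_storm_hurri c_storm_hurri_alt
  show _ = List.map
      (fun year => (year, ((idlist.map (fun item => PySem.Str.slice item (some (-4)) none)).count year : Int)))
      (PySem.List.dedup (idlist.map (fun item => PySem.Str.slice item (some (-4)) none)))
  rw [foldA_eq idlist PySem.Dict.empty]
  rw [PySem.Dict.foldl_insert_getD_add_one_eq_counter, PySem.Dict.items_counter,
      PySem.List.dedup_eq_ofList]
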